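-- pv_equiv track=rewrite | github.com/ftkbyond77/DSI314-Project | core/views_optimized.py | _bucket_tasks_kanban
-- ===== SOURCE A (Python) =====
-- def _bucket_tasks_kanban(tasks):
--     """Helper to bucket tasks into High Quality, Back Log, and Validated"""
--     columns = {
--         'high_quality': [],
--         'back_log': [],
--         'validated': []  # for user validation
--     }
--
--     # Sort by priority first
--     tasks_sorted = sorted(tasks, key=lambda x: x.get('priority', 999))
--
--     for task in tasks_sorted:
--         priority = task.get('priority', 999)
--         urgency = task.get('urgency', 0)
--
--         # Logic: Priorities 1-5 OR Very High Urgency goes to High Quality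
--         # Everything else goes to Back Log
--         if priority <= 5 or urgency >= 8:
--             columns['high_quality'].append(task)
--         else:
--             columns['back_log'].append(task)
--
--     return columns
-- ===== SOURCE B (Python) =====
-- def _bucket_tasks_kanban(tasks):
--     """Partition first, then stably sort each bucket by priority (same output as sort-then-partition)."""
--     hq = [t for t in tasks if t.get('priority', 999) <= 5 or t.get('urgency', 0) >= 8]
--     bl = [t for t in tasks if not (t.get('priority', 999) <= 5 or t.get('urgency', 0) >= 8)]
--     key = lambda x: x.get('priority', 999)
--     hq.sort(key=key)
--     bl.sort(key=key)
--     return {'high_quality': hq, 'back_log': bl, 'validated': []}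
-- ===== Notes on version B (the rewrite author's own statement) =====
-- stated objective: alternative
-- what changed: B partitions the unsorted tasks into the two buckets in one pass and then stably sorts each bucket by priority, instead of A's globally sorting first and then scanning the sorted list to partition; stability of the per-bucket sort makes the outputs identical.
import Mathlib
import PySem

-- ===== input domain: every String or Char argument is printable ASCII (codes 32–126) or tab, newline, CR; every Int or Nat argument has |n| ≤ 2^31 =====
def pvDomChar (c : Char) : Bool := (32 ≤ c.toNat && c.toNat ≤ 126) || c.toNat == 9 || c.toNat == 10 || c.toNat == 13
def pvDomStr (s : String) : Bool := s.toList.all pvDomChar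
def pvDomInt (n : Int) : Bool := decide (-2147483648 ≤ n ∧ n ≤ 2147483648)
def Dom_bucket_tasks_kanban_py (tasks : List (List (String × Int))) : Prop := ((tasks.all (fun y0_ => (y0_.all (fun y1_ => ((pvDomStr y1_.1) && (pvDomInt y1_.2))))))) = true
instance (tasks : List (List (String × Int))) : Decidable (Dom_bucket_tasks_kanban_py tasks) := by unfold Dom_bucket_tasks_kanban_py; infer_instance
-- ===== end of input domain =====

-- B partitions the unsorted tasks first and then stably sorts each bucket by priority,
-- instead of A's sort-then-scan; same output (objective: alternative decomposition).

-- shared helper: task.get(k, dflt) on a task dict (first-match association-list lookup)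
def pvTaskGet (t : List (String × Int)) (k : String) (d : Int) : Int :=
  (PySem.Dict.mk t).getD k d

-- ===== PORT A =====
-- A sorts the whole list by priority, then one loop appends each task to the
-- 'high_quality' or 'back_log' list of the columns dict ('validated' is never touched);
-- the two mutable column lists are carried as a pair, the dict is assembled at return.
def bucket_tasks_kanban_py (tasks : List (List (String × Int))) : List (String × List (List (String × Int))) :=
  let tasks_sorted := PySem.List.sorted tasks (fun x => pvTaskGet x "priority" 999) false
  let cols := tasks_sorted.foldl
    (fun (acc : List (List (String × Int)) × List (List (String × Int))) task =>
      if pvTaskGet task "priority" 999 ≤ 5 ∨ pvTaskGet task "urgency" 0 ≥ 8 then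
        (acc.1 ++ [task], acc.2)
      else
        (acc.1, acc.2 ++ [task]))
    ([], [])
  [("high_quality", cols.1), ("back_log", cols.2), ("validated", [])]

-- ===== PORT B =====
def bucket_tasks_kanban_py_alt (tasks : List (List (String × Int))) : List (String × List (List (String × Int))) :=
  let hq := tasks.filter (fun t => decide (pvTaskGet t "priority" 999 ≤ 5 ∨ pvTaskGet t "urgency" 0 ≥ 8))
  let bl := tasks.filter (fun t => !decide (pvTaskGet t "priority" 999 ≤ 5 ∨ pvTaskGet t "urgency" 0 ≥ 8))
  [("high_quality", PySem.List.sorted hq (fun x => pvTaskGet x "priority" 999) false),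
   ("back_log", PySem.List.sorted bl (fun x => pvTaskGet x "priority" 999) false),
   ("validated", [])]

-- ===== PRECONDITION & SPEC =====
def Spec_bucket_tasks_kanban_py (tasks : List (List (String × Int))) (out : List (String × List (List (String × Int)))) : Prop := out = bucket_tasks_kanban_py_alt tasks
instance (tasks : List (List (String × Int))) (out : List (String × List (List (String × Int)))) : Decidable (Spec_bucket_tasks_kanban_py tasks out) := by unfold Spec_bucket_tasks_kanban_py; infer_instance

-- ===== CLAIM (what is proved, stated in full; the proofs are below) =====
def Claim_equal_bucket_tasks_kanban_py : Prop := ∀ (tasks : List (List (String × Int))), Dom_bucket_tasks_kanban_py tasks → Spec_bucket_tasks_kanban_py tasks (bucket_tasks_kanban_py tasks)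

-- ===== LEMMAS AND PROOFS =====

-- A's partition loop over a pair of accumulators is the two filters.
theorem pv_pairfold_eq_filters {α : Type} (c : α → Prop) [DecidablePred c] :
    ∀ (ts : List α) (a b : List α),
      ts.foldl (fun (acc : List α × List α) t =>
          if c t then (acc.1 ++ [t], acc.2) else (acc.1, acc.2 ++ [t])) (a, b)
        = (a ++ ts.filter (fun t => decide (c t)),
           b ++ ts.filter (fun t => !decide (c t))) := by
  intro ts
  induction ts with
  | nil => intro a b; simp
  | cons x xs ih =>
      intro a b
      by_cases hx : c x <;>
        simp [List.foldl_cons, hx, ih, List.append_assoc]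

-- filtering away x removes it from an insertBy result
theorem pv_filter_insertBy_of_false {α : Type} (before : α → α → Bool) (p : α → Bool)
    (x : α) (hx : p x = false) :
    ∀ (S : List α), (PySem.List.insertBy before x S).filter p = S.filter p := by
  intro S
  induction S with
  | nil => simp [PySem.List.insertBy, hx]
  | cons y ys ih =>
      by_cases hb : before x y = true <;>
        simp [PySem.List.insertBy, hb, List.filter_cons, hx, ih]

-- x goes to the front when it sorts before everything in the list
theorem pv_insertBy_eq_cons {α : Type} (before : α → α → Bool) (x : α) (zs : List α)
    (h : ∀ z ∈ zs, before x z = true) :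
    PySem.List.insertBy before x zs = x :: zs := by
  cases zs with
  | nil => rfl
  | cons z t => simp [PySem.List.insertBy, h z (by simp)]

-- on a key-sorted list, filtering commutes with insertBy (x kept by the filter)
theorem pv_filter_insertBy_sorted {α : Type} (key : α → Int) (p : α → Bool)
    (x : α) (hx : p x = true) :
    ∀ (S : List α), S.Pairwise (fun a c => key a ≤ key c) →
      (PySem.List.insertBy (fun a c => decide (key a < key c)) x S).filter p
        = PySem.List.insertBy (fun a c => decide (key a < key c)) x (S.filter p) := by
  intro S
  induction S with
  | nil => intro _; simp [PySem.List.insertBy, hx]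
  | cons y ys ih =>
      intro hp
      have hpt : ys.Pairwise (fun a c => key a ≤ key c) := hp.of_cons
      by_cases hb : key x < key y
      · -- x is inserted in front of y
        have h1 : PySem.List.insertBy (fun a c => decide (key a < key c)) x (y :: ys)
            = x :: y :: ys := by simp [PySem.List.insertBy, hb]
        rw [h1]
        by_cases hy : p y = true
        · simp [hx, hy, PySem.List.insertBy, hb]
        · have hall : ∀ z ∈ (y :: ys).filter p, decide (key x < key z) = true := by
            intro z hz
            have hz' := List.mem_of_mem_filter hz
            rcases List.mem_cons.mp hz' with h | h
            · subst h
              exact absurd (List.of_mem_filter hz) (by simp [hy])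
            · have : key y ≤ key z := (List.pairwise_cons.mp hp).1 z h
              simp; omega
          rw [pv_insertBy_eq_cons _ _ _ hall]
          simp [hx, hy]
      · -- x goes past y
        have h1 : PySem.List.insertBy (fun a c => decide (key a < key c)) x (y :: ys)
            = y :: PySem.List.insertBy (fun a c => decide (key a < key c)) x ys := by
          simp [PySem.List.insertBy, hb]
        rw [h1]
        by_cases hy : p y = true
        · simp [hy, ih hpt, PySem.List.insertBy, hb]
        · simp [hy, ih hpt]

-- filtering a stable sort = stably sorting the filtered list
theorem pv_filter_sorted {α : Type} (key : α → Int) (p : α → Bool) (xs : List α) :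
    (PySem.List.sorted xs key false).filter p
      = PySem.List.sorted (xs.filter p) key false := by
  induction xs using List.reverseRecOn with
  | nil => simp [PySem.List.sorted]
  | append_singleton xs x ih =>
      have hcat : ∀ (l : List α),
          PySem.List.sorted (l ++ [x]) key false
            = PySem.List.insertBy (fun a c => decide (key a < key c)) x
                (PySem.List.sorted l key false) := by
        intro l
        rw [PySem.List.sorted_eq_foldl_insertBy, PySem.List.sorted_eq_foldl_insertBy,
          List.foldl_append]
        rfl
      by_cases hx : p x = true
      · rw [hcat, pv_filter_insertBy_sorted key p x hx _
            (PySem.List.sorted_pairwise xs key), ih, List.filter_append,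
          List.filter_cons]
        simp [hx, hcat]
      · rw [hcat, pv_filter_insertBy_of_false _ p x (by simpa using hx), ih,
          List.filter_append, List.filter_cons]
        simp [hx]

-- ===== VERDICT (by name: the statement is the Claim_ definition above) =====
theorem bucket_tasks_kanban_py_spec : Claim_equal_bucket_tasks_kanban_py := by
  intro tasks _
  unfold Spec_bucket_tasks_kanban_py bucket_tasks_kanban_py bucket_tasks_kanban_py_alt
  simp only [pv_pairfold_eq_filters
      (fun t => pvTaskGet t "priority" 999 ≤ 5 ∨ pvTaskGet t "urgency" 0 ≥ 8),
    List.nil_append, pv_filter_sorted]
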